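-- pv_equiv track=rewrite | github.com/sheldon-xiong/xxd-mlpinf | closed/NVIDIA/code/rgat/pytorch/preprocess_data.py | merge_full_config
-- ===== SOURCE A (Python) =====
-- def merge_full_config(default_config, fix_config):
--     merged_config = {}
--     for key, value in fix_config.items():
--         if key not in default_config:
--             raise KeyError('key {} in fix_config {}: {} but not in default_config'.format(key, key, value))
--     for key, value in default_config.items():
--         merged_config[key] = fix_config[key] if key in fix_config else default_config[key]
--     return merged_config
-- ===== SOURCE B (Python) =====
-- def merge_full_config(default_config, fix_config):
--     # One dict-union builds the whole result; validation is a cardinality check: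
--     # the union grew iff some fix_config key is absent from default_config.
--     merged = {**default_config, **fix_config}
--     if len(merged) != len(default_config):
--         key = next(k for k in fix_config if k not in default_config)
--         raise KeyError('key {} in fix_config {}: {} but not in default_config'.format(
--             key, key, fix_config[key]))
--     return merged
-- ===== Notes on version B (the rewrite author's own statement) =====
-- stated objective: idiomatic
-- what changed: A loops over fix_config testing each key's membership in default_config and then rebuilds the dict key-by-key with a conditional lookup per key; B builds the result in one dict-union {**default_config, **fix_config} and validates by a single cardinality comparison (the union grew iff some fix key is new), raising the identical KeyError on the same first offending key.
import Mathlib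
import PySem

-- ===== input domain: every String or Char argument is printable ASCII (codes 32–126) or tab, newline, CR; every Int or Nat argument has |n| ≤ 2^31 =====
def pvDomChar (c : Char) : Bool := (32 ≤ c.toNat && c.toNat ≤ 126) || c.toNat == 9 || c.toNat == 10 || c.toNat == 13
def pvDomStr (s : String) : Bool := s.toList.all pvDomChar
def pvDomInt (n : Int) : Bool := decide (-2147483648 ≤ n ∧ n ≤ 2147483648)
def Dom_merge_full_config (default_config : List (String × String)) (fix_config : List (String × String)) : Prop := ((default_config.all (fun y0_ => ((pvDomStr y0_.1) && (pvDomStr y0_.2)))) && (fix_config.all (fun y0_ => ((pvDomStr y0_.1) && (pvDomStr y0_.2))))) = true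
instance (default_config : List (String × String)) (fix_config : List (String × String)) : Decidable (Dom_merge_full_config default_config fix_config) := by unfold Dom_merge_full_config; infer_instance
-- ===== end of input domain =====

-- B replaces A's validate-each-key-then-rebuild-key-by-key merge with one dict union
-- {**default_config, **fix_config} plus a cardinality check (raise excluded via Pre_); objective: idiomatic.


-- ===== PORT A =====
-- merged_config = {}; first loop only raises (excluded by Pre_); second loop inserts every
-- default key with fix_config[key] if present else default_config[key].
def merge_full_config (default_config : List (String × String)) (fix_config : List (String × String)) : List (String × String) :=
  let d := PySem.Dict.ofList default_config
  let f := PySem.Dict.ofList fix_config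
  -- for key, value in fix_config.items(): if key not in default_config: raise KeyError(...)
  -- (the loop has no other effect; Pre_ excludes the raising inputs)
  let merged := d.items.foldl
    (fun (m : PySem.Dict String String) kv =>
      m.insert kv.1 (if f.contains kv.1 then f.getD kv.1 "" else d.getD kv.1 "")) PySem.Dict.empty
  merged.items

-- ===== PORT B =====
-- merged = {**default_config, **fix_config}: inserting all default pairs then all fix pairs,
-- i.e. Dict.ofList of the concatenation.  The `if len(merged) != len(default_config)` raise
-- branch fires exactly on the inputs Pre_ excludes (the union grows iff a fix key is new).
def merge_full_config_alt (default_config : List (String × String)) (fix_config : List (String × String)) : List (String × String) :=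
  let merged := PySem.Dict.ofList (default_config ++ fix_config)
  merged.items

-- ===== PRECONDITION & SPEC =====
-- Pre_ excludes exactly the inputs on which Python A raises KeyError: a fix_config key absent
-- from default_config (B raises the identical KeyError there).
def Pre_merge_full_config (default_config : List (String × String)) (fix_config : List (String × String)) : Prop :=
  ∀ p ∈ fix_config, p.1 ∈ default_config.map Prod.fst
instance (default_config : List (String × String)) (fix_config : List (String × String)) : Decidable (Pre_merge_full_config default_config fix_config) := by unfold Pre_merge_full_config; infer_instance
def pvWitness_merge_full_config : (List (String × String)) × (List (String × String)) :=
  ([("a", "1"), ("b", "2")], [("b", "3")])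
def Spec_merge_full_config (default_config : List (String × String)) (fix_config : List (String × String)) (out : List (String × String)) : Prop := out = merge_full_config_alt default_config fix_config
instance (default_config : List (String × String)) (fix_config : List (String × String)) (out : List (String × String)) : Decidable (Spec_merge_full_config default_config fix_config out) := by unfold Spec_merge_full_config; infer_instance

-- ===== CLAIM (what is proved, stated in full; the proofs are below) =====
def Claim_equal_merge_full_config : Prop := ∀ (default_config : List (String × String)) (fix_config : List (String × String)), Dom_merge_full_config default_config fix_config → Pre_merge_full_config default_config fix_config → Spec_merge_full_config default_config fix_config (merge_full_config default_config fix_config)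

-- ===== LEMMAS AND PROOFS =====

-- keys of a dict built from a pair list are exactly the list's first components (as a set)
theorem contains_ofList_iff {κ ν : Type} [BEq κ] [LawfulBEq κ] (L : List (κ × ν)) (k : κ) :
    (PySem.Dict.ofList L).contains k = true ↔ k ∈ L.map Prod.fst := by
  rw [PySem.Dict.contains_iff_mem_keys]
  show k ∈ (List.foldl (fun acc p => acc.insert p.1 p.2) PySem.Dict.empty L).keys ↔ _
  rw [PySem.Dict.keys_foldl_insert_key L Prod.fst (fun _ p => p.2) PySem.Dict.empty]
  simp [PySem.Set.mem_update, PySem.Dict.keys_empty]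

-- lookup in Dict.ofList is the LAST pair with that key ("last write wins")
theorem get?_ofList_last (L : List (String × String)) (k : String) :
    (PySem.Dict.ofList L).get? k = (L.reverse.find? (fun p => p.1 == k)).map Prod.snd := by
  induction L using List.reverseRecOn with
  | nil => rfl
  | append_singleton M p ih =>
    have hof : PySem.Dict.ofList (M ++ [p]) = (PySem.Dict.ofList M).insert p.1 p.2 := by
      show (M ++ [p]).foldl _ PySem.Dict.empty = _
      rw [List.foldl_append]; rfl
    rw [hof, PySem.Dict.get?_insert, List.reverse_append]
    simp only [List.reverse_singleton, List.singleton_append, List.find?_cons]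
    by_cases h : k = p.1
    · simp [h]
    · have h' : (p.1 == k) = false := by simp [Ne.symm h]
      simp [h, h', ih]

-- folding overwriting inserts whose keys are all present rewrites values in place (last wins)
theorem foldl_insert_over (L : List (String × String)) (d : PySem.Dict String String)
    (hsub : ∀ p ∈ L, d.contains p.1 = true) :
    (L.foldl (fun (m : PySem.Dict String String) kv => m.insert kv.1 kv.2) d).items
      = d.items.map (fun kv => match L.reverse.find? (fun p => p.1 == kv.1) with
          | some p => (kv.1, p.2)
          | none => kv) := by
  induction L generalizing d with
  | nil => simp
  | cons p T ih =>
    have hd : d.contains p.1 = true := hsub p (by simp)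
    have hT : ∀ q ∈ T, (d.insert p.1 p.2).contains q.1 = true := by
      intro q hq
      rw [PySem.Dict.contains_insert]
      simp [hsub q (by simp [hq])]
    rw [List.foldl_cons, ih (d.insert p.1 p.2) hT,
        PySem.Dict.items_insert_of_contains d p.2 hd, List.map_map]
    apply List.map_congr_left
    intro q _
    rw [List.reverse_cons]
    cases hf : T.reverse.find? (fun r => r.1 == q.1) with
    | some r =>
      have happ : (T.reverse ++ [p]).find? (fun r => r.1 == q.1) = some r := by
        rw [List.find?_append, hf]; rfl
      by_cases h : q.1 = p.1
      · have hf' : T.reverse.find? (fun r => r.1 == p.1) = some r := by rw [← h]; exact hf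
        simp [Function.comp, h, hf']
      · have h' : (q.1 == p.1) = false := by simp [h]
        simp [Function.comp, h', hf, happ]
    | none =>
      by_cases h : q.1 = p.1
      · have hf' : T.reverse.find? (fun r => r.1 == p.1) = none := by rw [← h]; exact hf
        simp [Function.comp, h, hf']
      · have h' : (q.1 == p.1) = false := by simp [h]
        have happ : (T.reverse ++ [p]).find? (fun r => r.1 == q.1) = none := by
          rw [List.find?_append, hf]
          simp [Ne.symm h]
        simp [Function.comp, h', hf, happ]

-- Python's `fix[k] if k in fix else default[k]` entry, rewritten through last-match on fix_config
theorem value_case (fc : List (String × String)) (d : PySem.Dict String String)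
    (hdnd : d.keys.Nodup) (kv : String × String) (hkv : kv ∈ d.items) :
    (kv.1, if (PySem.Dict.ofList fc).contains kv.1
             then (PySem.Dict.ofList fc).getD kv.1 "" else d.getD kv.1 "")
      = (match fc.reverse.find? (fun p => p.1 == kv.1) with
          | some p => (kv.1, p.2)
          | none => kv) := by
  obtain ⟨k, v⟩ := kv
  cases hf : fc.reverse.find? (fun p => p.1 == k) with
  | some p =>
    have hget : (PySem.Dict.ofList fc).get? k = some p.2 := by
      rw [get?_ofList_last, hf]; rfl
    have hc : (PySem.Dict.ofList fc).contains k = true := by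
      rw [PySem.Dict.contains_eq_isSome_get?, hget]; rfl
    simp [hc, PySem.Dict.getD_eq_get?_getD, hget]
  | none =>
    have hget : (PySem.Dict.ofList fc).get? k = none := by
      rw [get?_ofList_last, hf]; rfl
    have hc : (PySem.Dict.ofList fc).contains k = false := by
      rw [PySem.Dict.contains_eq_isSome_get?, hget]; rfl
    have hdv : d.getD k "" = v := PySem.Dict.getD_of_mem_items d hkv hdnd ""
    simp [hc, hdv]

-- ===== VERDICT (by name: the statement is the Claim_ definition above) =====
theorem merge_full_config_spec : Claim_equal_merge_full_config := by
  intro dc fc _ hpre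
  show merge_full_config dc fc = merge_full_config_alt dc fc
  unfold merge_full_config merge_full_config_alt
  set d := PySem.Dict.ofList dc with hd
  have hdnd : d.keys.Nodup := PySem.Dict.nodup_keys_ofList dc
  -- A side: building from the empty dict over d's (distinct, fresh) keys appends
  have hA := PySem.Dict.items_foldl_insert_fresh d.items
      (fun kv => kv.1)
      (fun kv => if (PySem.Dict.ofList fc).contains kv.1
                   then (PySem.Dict.ofList fc).getD kv.1 "" else d.getD kv.1 "")
      PySem.Dict.empty
      (by intro a _; exact PySem.Dict.contains_empty _)
      hdnd
  -- B side: the union = folding fix_config's inserts into d; every fix key is already in d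
  have hof : PySem.Dict.ofList (dc ++ fc)
      = fc.foldl (fun (m : PySem.Dict String String) kv => m.insert kv.1 kv.2) d := by
    show (dc ++ fc).foldl _ PySem.Dict.empty = _
    rw [List.foldl_append]; rfl
  have hsub : ∀ p ∈ fc, d.contains p.1 = true := by
    intro p hp
    exact (contains_ofList_iff dc p.1).mpr (hpre p hp)
  have hB := foldl_insert_over fc d hsub
  simp only []
  rw [hA, hof, hB, PySem.Dict.items]
  simp only [PySem.Dict.empty]
  rw [List.nil_append]
  exact List.map_congr_left (fun kv hkv => value_case fc d hdnd kv hkv)
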